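-- pv_equiv track=rewrite | github.com/aa-blinov/self-hosted-search-agent | search_agent/evaluation.py | _match_tokens
-- ===== SOURCE A (Python) =====
-- def _match_tokens(text: str) -> list[str]:
--     stopwords = {"a", "an", "the", "of", "is", "was", "were", "on", "in", "at", "for", "and"}
--     tokens: list[str] = []
--     current: list[str] = []
--     for ch in (text or "").casefold():
--         if ch.isalnum():
--             current.append(ch)
--             continue
--         if current:
--             token = "".join(current)
--             if token not in stopwords:
--                 tokens.append(token)
--             current = []
--     if current:
--         token = "".join(current)
--         if token not in stopwords:
--             tokens.append(token)
--     return tokens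
-- ===== SOURCE B (Python) =====
-- def _match_tokens(text: str) -> list[str]:
--     stopwords = {"a", "an", "the", "of", "is", "was", "were", "on", "in", "at", "for", "and"}
--     cleaned = "".join(ch if ch.isalnum() else " " for ch in (text or "").casefold())
--     return [token for token in cleaned.split() if token not in stopwords]
-- ===== Notes on version B (the rewrite author's own statement) =====
-- stated objective: idiomatic
-- what changed: Replaces the explicit current-buffer/flush state machine with a mask-then-split pipeline: non-alnum chars are mapped to spaces and str.split() plus a filtering comprehension produces the tokens.
import Mathlib
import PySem

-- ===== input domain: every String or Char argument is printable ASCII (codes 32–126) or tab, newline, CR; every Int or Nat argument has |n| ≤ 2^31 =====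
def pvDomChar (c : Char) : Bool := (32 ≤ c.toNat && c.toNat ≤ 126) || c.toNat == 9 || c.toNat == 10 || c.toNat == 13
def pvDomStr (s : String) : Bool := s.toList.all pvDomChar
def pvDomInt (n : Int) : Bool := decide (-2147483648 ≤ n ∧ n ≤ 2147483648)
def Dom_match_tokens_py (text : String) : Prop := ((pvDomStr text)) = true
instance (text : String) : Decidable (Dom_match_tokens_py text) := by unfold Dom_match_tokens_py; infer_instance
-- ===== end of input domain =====

-- B replaces A's explicit current-buffer/flush state machine by a mask-then-split pipeline
-- (non-alnum chars mapped to spaces, then str.split() and a filtering comprehension): idiomatic, same cost.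

-- ===== PORT A =====
-- the stopword set literal (shared by both ports, as in both Pythons)
def pvStopwords : PySem.Set String :=
  PySem.Set.ofList ["a", "an", "the", "of", "is", "was", "were", "on", "in", "at", "for", "and"]

-- the body of A's for-loop (state = (tokens, current))
def pvStepA (st : List String × List Char) (ch : Char) : List String × List Char :=
  if PySem.Chars.isalnum ch then (st.1, st.2 ++ [ch])
  else if st.2.isEmpty then st
  else if pvStopwords.contains (String.ofList st.2) then (st.1, []) else (st.1 ++ [String.ofList st.2], [])

-- A's trailing `if current:` flush
def pvFlushA (st : List String × List Char) : List String :=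
  if st.2.isEmpty then st.1
  else if pvStopwords.contains (String.ofList st.2) then st.1 else st.1 ++ [String.ofList st.2]

-- `(text or "").casefold()` ported as PySem.Chars.lower: exact on the ASCII domain, where casefold = lower
def match_tokens_py (text : String) : List String :=
  pvFlushA ((PySem.Chars.lower (if text == "" then "" else text).toList).foldl pvStepA ([], []))

-- ===== PORT B =====
-- `ch if ch.isalnum() else " "`
def pvMask (c : Char) : Char := if PySem.Chars.isalnum c then c else ' '

-- mask to spaces, split on whitespace, filter stopwords (casefold again ported as lower: exact on ASCII)
def match_tokens_py_alt (text : String) : List String :=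
  ((PySem.Chars.split₀ ((PySem.Chars.lower (if text == "" then "" else text).toList).map pvMask)).map
      String.ofList).filter (fun t => !pvStopwords.contains t)

-- ===== PRECONDITION & SPEC =====
def Spec_match_tokens_py (text : String) (out : List String) : Prop := out = match_tokens_py_alt text
instance (text : String) (out : List String) : Decidable (Spec_match_tokens_py text out) := by unfold Spec_match_tokens_py; infer_instance

-- ===== CLAIM (what is proved, stated in full; the proofs are below) =====
def Claim_equal_match_tokens_py : Prop := ∀ (text : String), Dom_match_tokens_py text → Spec_match_tokens_py text (match_tokens_py text)

-- ===== LEMMAS AND PROOFS =====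

-- B's map-then-filter applied to a list of raw tokens
def pvFilt (ts : List (List Char)) : List String :=
  (ts.map String.ofList).filter (fun t => !pvStopwords.contains t)

lemma pvFilt_append (xs ys : List (List Char)) : pvFilt (xs ++ ys) = pvFilt xs ++ pvFilt ys := by
  simp [pvFilt]

-- an alphanumeric char is never whitespace
lemma pv_not_space_of_alnum (c : Char) (h : PySem.Chars.isalnum c = true) :
    PySem.Chars.isspace c = false := by
  simp only [PySem.Chars.isalnum, PySem.Chars.isalpha, PySem.Chars.isdigit, PySem.Chars.isupper,
    PySem.Chars.islower, Bool.or_eq_true, Bool.and_eq_true, decide_eq_true_eq, Char.le_def,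
    UInt32.le_iff_toNat_le] at h
  simp only [PySem.Chars.isspace, Bool.or_eq_false_iff, Bool.and_eq_false_iff,
    decide_eq_false_iff_not, Char.toNat]
  have e0 : ('0' : Char).val.toNat = 48 := rfl
  have e9 : ('9' : Char).val.toNat = 57 := rfl
  have eA : ('A' : Char).val.toNat = 65 := rfl
  have eZ : ('Z' : Char).val.toNat = 90 := rfl
  have ea : ('a' : Char).val.toNat = 97 := rfl
  have ez : ('z' : Char).val.toNat = 122 := rfl
  omega

-- split₀.go with a non-empty accumulator: the accumulated tokens come out in front
lemma pv_go_acc (s : List Char) : ∀ (cur : List Char) (acc : List (List Char)),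
    PySem.Chars.split₀.go s cur acc = acc.reverse ++ PySem.Chars.split₀.go s cur [] := by
  induction s with
  | nil => intro cur acc; simp [PySem.Chars.split₀.go]; split <;> simp
  | cons c rest ih =>
    intro cur acc
    simp only [PySem.Chars.split₀.go]
    split
    · split
      · exact ih [] acc
      · rw [ih [] (cur.reverse :: acc), ih [] [cur.reverse]]; simp
    · exact ih (c :: cur) acc

-- the loop invariant: A's fold + flush = prior tokens ++ B's filtered split of the masked rest
lemma pv_main (cs : List Char) : ∀ (toks : List String) (cur : List Char),
    pvFlushA (cs.foldl pvStepA (toks, cur)) =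
      toks ++ pvFilt (PySem.Chars.split₀.go (cs.map pvMask) cur.reverse []) := by
  induction cs with
  | nil =>
    intro toks cur
    rcases cur with _ | ⟨c, cur'⟩
    · simp [pvFlushA, pvFilt, PySem.Chars.split₀.go]
    · by_cases hc : String.ofList (c :: cur') ∈ pvStopwords
      · simp [pvFlushA, pvFilt, PySem.Chars.split₀.go, List.filter, hc]
      · simp [pvFlushA, pvFilt, PySem.Chars.split₀.go, List.filter, hc]
  | cons c rest ih =>
    intro toks cur
    simp only [List.foldl_cons, List.map_cons, pvStepA]
    by_cases ha : PySem.Chars.isalnum c = true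
    · rw [if_pos ha, ih toks (cur ++ [c])]
      simp only [pvMask, if_pos ha, PySem.Chars.split₀.go, pv_not_space_of_alnum c ha]
      simp
    · rw [if_neg ha]
      have hm : pvMask c = ' ' := by simp [pvMask, ha]
      rcases cur with _ | ⟨d, cur'⟩
      · simp only [List.isEmpty_nil, List.reverse_nil, if_true, hm]
        rw [show PySem.Chars.split₀.go (' ' :: List.map pvMask rest) [] []
              = PySem.Chars.split₀.go (List.map pvMask rest) [] [] from by
            simp [PySem.Chars.split₀.go, show PySem.Chars.isspace ' ' = true from by decide]]
        simpa using ih toks []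
      · simp only [List.isEmpty_cons, Bool.false_eq_true, if_false]
        rw [show PySem.Chars.split₀.go (pvMask c :: List.map pvMask rest) (d :: cur').reverse []
              = PySem.Chars.split₀.go (List.map pvMask rest) [] [(d :: cur').reverse.reverse] from by
            rw [hm]
            simp [PySem.Chars.split₀.go, show PySem.Chars.isspace ' ' = true from by decide],
          pv_go_acc _ [] [(d :: cur').reverse.reverse], List.reverse_reverse,
          List.reverse_singleton, pvFilt_append]
        by_cases hc : String.ofList (d :: cur') ∈ pvStopwords
        · have hcb : pvStopwords.contains (String.ofList (d :: cur')) = true := by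
            simpa [pvStopwords] using hc
          rw [if_pos hcb]
          have h1 : pvFilt [d :: cur'] = [] := by simp [pvFilt, List.filter, hc]
          rw [h1]
          simpa using ih toks []
        · have hcb : ¬ pvStopwords.contains (String.ofList (d :: cur')) = true := by
            simpa [pvStopwords] using hc
          rw [if_neg hcb]
          have h1 : pvFilt [d :: cur'] = [String.ofList (d :: cur')] := by
            simp [pvFilt, List.filter, hc]
          rw [h1]
          have := ih (toks ++ [String.ofList (d :: cur')]) []
          simp only [List.reverse_nil] at this
          rw [this, List.append_assoc]

-- ===== VERDICT (by name: the statement is the Claim_ definition above) =====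
theorem match_tokens_py_spec : Claim_equal_match_tokens_py := by
  intro text _
  unfold Spec_match_tokens_py match_tokens_py match_tokens_py_alt PySem.Chars.split₀
  rw [pv_main]
  simp [pvFilt]
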